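-- pv_equiv track=rewrite | github.com/olliechick/olliechick.github.io | podcasts/scripts/convert_urls_to_archive.py | url_in_domains
-- ===== SOURCE A (Python) =====
-- def url_in_domains(url, domains):
--     full_domains = domains[:]
--     for valid_start in domains:
--         full_domains += ['http://' + valid_start, 'https://' + valid_start]
--
--     for domain in full_domains:
--         if url[:len(domain)] == domain:
--             return True
--
--     return False
-- ===== SOURCE B (Python) =====
-- def url_in_domains(url, domains):
--     if url.startswith('http://'):
--         stripped = url[7:]
--     elif url.startswith('https://'):
--         stripped = url[8:]
--     else:
--         stripped = url
--     return any(url.startswith(d) or stripped.startswith(d) for d in domains)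
-- ===== Notes on version B (the rewrite author's own statement) =====
-- stated objective: simpler
-- what changed: B strips one leading http:// or https:// scheme from the url once and checks each domain directly against the raw and stripped url, instead of building the 3x-expanded full_domains list and slicing the url per candidate.
import Mathlib
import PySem

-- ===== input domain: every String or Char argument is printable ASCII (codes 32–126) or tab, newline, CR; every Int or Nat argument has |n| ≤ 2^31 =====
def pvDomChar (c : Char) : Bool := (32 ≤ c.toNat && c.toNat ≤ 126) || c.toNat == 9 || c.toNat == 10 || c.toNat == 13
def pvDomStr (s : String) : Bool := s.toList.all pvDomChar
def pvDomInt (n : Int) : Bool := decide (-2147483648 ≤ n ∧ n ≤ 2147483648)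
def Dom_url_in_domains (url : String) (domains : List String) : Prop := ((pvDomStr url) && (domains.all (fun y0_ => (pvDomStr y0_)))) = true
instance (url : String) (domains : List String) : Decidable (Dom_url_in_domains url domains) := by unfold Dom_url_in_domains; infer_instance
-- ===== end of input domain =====

-- B replaces A's 3x-expanded full_domains list by stripping one leading scheme from the
-- url and checking each domain against the raw and stripped url (objective: simpler).

-- ===== PORT A =====
-- full_domains = domains[:] ; for valid_start in domains: full_domains += ['http://'+vs, 'https://'+vs]
-- then: for domain in full_domains: if url[:len(domain)] == domain: return True ; return False
-- (strings handled as List Char; url[:len(domain)] is PySem.List.slice with stop = len domain)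
def url_in_domains (url : String) (domains : List String) : Bool :=
  let ds := domains.map String.toList
  let fullDomains :=
    ds.foldl (fun acc vs => acc ++ ["http://".toList ++ vs, "https://".toList ++ vs]) ds
  fullDomains.any (fun d =>
    PySem.List.slice url.toList none (some (PySem.Chars.len d)) == d)

-- ===== PORT B =====
-- strip exactly one leading 'http://' or 'https://' (if present), then
-- any(url.startswith(d) or stripped.startswith(d) for d in domains)
def url_in_domains_alt (url : String) (domains : List String) : Bool :=
  let u := url.toList
  let stripped :=
    if PySem.Chars.startswith u "http://".toList then u.drop 7
    else if PySem.Chars.startswith u "https://".toList then u.drop 8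
    else u
  domains.any (fun d =>
    PySem.Chars.startswith u d.toList || PySem.Chars.startswith stripped d.toList)

-- ===== PRECONDITION & SPEC =====
def Spec_url_in_domains (url : String) (domains : List String) (out : Bool) : Prop := out = url_in_domains_alt url domains
instance (url : String) (domains : List String) (out : Bool) : Decidable (Spec_url_in_domains url domains out) := by unfold Spec_url_in_domains; infer_instance

-- ===== CLAIM (what is proved, stated in full; the proofs are below) =====
def Claim_equal_url_in_domains : Prop := ∀ (url : String) (domains : List String), Dom_url_in_domains url domains → Spec_url_in_domains url domains (url_in_domains url domains)

-- ===== LEMMAS AND PROOFS =====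

-- url[:len(d)] == d is exactly "d is a prefix of url"
theorem slice_to_len_eq_iff (u d : List Char) :
    (PySem.List.slice u none (some (PySem.Chars.len d)) == d) = decide (d <+: u) := by
  have h : PySem.List.slice u none (some (PySem.Chars.len d)) = u.take d.length := by
    have hc : PySem.List.clampIdx u.length ((d.length : Int)) = min d.length u.length := by
      simp [PySem.List.clampIdx]
    simp only [PySem.List.slice, PySem.Chars.len, hc, List.drop_zero, Nat.sub_zero]
    rcases le_total d.length u.length with hle | hle
    · rw [min_eq_left hle]
    · rw [min_eq_right hle, List.take_of_length_le (le_refl _), List.take_of_length_le hle]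
  rw [h]
  by_cases hp : d <+: u
  · simp [hp, (List.prefix_iff_eq_take.mp hp).symm]
  · simp [hp]
    intro he
    exact absurd (List.prefix_iff_eq_take.mpr he.symm) hp

-- startswith as a decide
theorem startswith_decide (s p : List Char) :
    PySem.Chars.startswith s p = decide (p <+: s) := by
  by_cases h : p <+: s <;>
    simp [PySem.Chars.startswith, Bool.eq_false_iff, List.isPrefixOf_iff_prefix, h]

-- any over a pointwise || splits
theorem any_or_distrib {α : Type} (l : List α) (p q : α → Bool) :
    l.any (fun x => p x || q x) = (l.any p || l.any q) := by
  induction l with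
  | nil => rfl
  | cons x l ih =>
    simp only [List.any_cons, ih]
    cases p x <;> cases q x <;> simp

-- (a ++ b) <+: l ↔ a <+: l ∧ b <+: l.drop a.length
theorem append_prefix_iff (a b l : List Char) :
    (a ++ b) <+: l ↔ a <+: l ∧ b <+: l.drop a.length := by
  induction a generalizing l with
  | nil => simp
  | cons x a ih =>
    cases l with
    | nil => simp
    | cons y l => simp [List.cons_prefix_cons, ih, and_assoc]

-- A's foldl-built full_domains list, flattened
theorem foldl_full (ds acc : List (List Char)) :
    ds.foldl (fun acc vs => acc ++ ["http://".toList ++ vs, "https://".toList ++ vs]) acc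
      = acc ++ ds.flatMap (fun vs => ["http://".toList ++ vs, "https://".toList ++ vs]) := by
  induction ds generalizing acc with
  | nil => simp
  | cons v ds _ => simp [List.foldl_cons, List.flatMap_def]

-- ===== VERDICT (by name: the statement is the Claim_ definition above) =====
theorem url_in_domains_spec : Claim_equal_url_in_domains := by
  intro url domains _
  unfold Spec_url_in_domains url_in_domains url_in_domains_alt
  simp only [foldl_full, List.any_append, List.any_flatMap, List.any_map,
    slice_to_len_eq_iff, List.any_cons, List.any_nil, startswith_decide,
    Function.comp_def, Bool.or_false]
  rw [← any_or_distrib]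
  set u := url.toList with hu
  have hcompat : ¬ ("http://".toList <+: u ∧ "https://".toList <+: u) := by
    rintro ⟨h1, h2⟩
    have e1 := List.prefix_iff_eq_take.mp h1
    have e2 := List.prefix_iff_eq_take.mp h2
    have : "http://".toList.take 7 = ("https://".toList.take 7 : List Char) := by
      rw [e1, e2]; simp [List.take_take]
    simp at this
  by_cases h1 : "http://".toList <+: u
  · have h1' : (['h','t','t','p',':','/','/'] : List Char) <+: u := h1
    have h2 : ¬ "https://".toList <+: u := fun h2 => hcompat ⟨h1, h2⟩
    simp only [h1, decide_true, if_true]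
    congr 1
    funext d
    have hh : ('h'::'t'::'t'::'p'::':'::'/'::'/'::d.toList : List Char) <+: u
        ↔ d.toList <+: u.drop 7 := by
      rw [show ('h'::'t'::'t'::'p'::':'::'/'::'/'::d.toList : List Char)
            = ['h','t','t','p',':','/','/'] ++ d.toList from rfl, append_prefix_iff]
      simp [h1']
    have hs : ¬ (('h'::'t'::'t'::'p'::'s'::':'::'/'::'/'::d.toList : List Char) <+: u) := by
      intro h
      exact h2 ((List.prefix_append (['h','t','t','p','s',':','/','/'] : List Char) d.toList).trans h)
    simp [hh, hs]
  · simp only [h1, decide_false]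
    have h1' : ∀ t : List Char, ¬ (('h'::'t'::'t'::'p'::':'::'/'::'/'::t : List Char) <+: u) := by
      intro t h
      exact h1 ((List.prefix_append (['h','t','t','p',':','/','/'] : List Char) t).trans h)
    by_cases h2 : "https://".toList <+: u
    · have h2' : (['h','t','t','p','s',':','/','/'] : List Char) <+: u := h2
      simp only [h2, decide_true, if_true]
      congr 1
      funext d
      have hs : ('h'::'t'::'t'::'p'::'s'::':'::'/'::'/'::d.toList : List Char) <+: u
          ↔ d.toList <+: u.drop 8 := by
        rw [show ('h'::'t'::'t'::'p'::'s'::':'::'/'::'/'::d.toList : List Char)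
              = ['h','t','t','p','s',':','/','/'] ++ d.toList from rfl, append_prefix_iff]
        simp [h2']
      simp [hs, h1' d.toList]
    · simp only [h2, decide_false]
      have h2' : ∀ t : List Char, ¬ (('h'::'t'::'t'::'p'::'s'::':'::'/'::'/'::t : List Char) <+: u) := by
        intro t h
        exact h2 ((List.prefix_append (['h','t','t','p','s',':','/','/'] : List Char) t).trans h)
      congr 1
      funext d
      simp [h1' d.toList, h2' d.toList]
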